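-- pv_equiv track=rewrite | github.com/firewire-forever/CoGenius | app/utils/vsdl_fixer.py | fix_network_connectivity_issues
-- ===== SOURCE A (Python) =====
-- def fix_network_connectivity_issues(vsdl_script: str) -> str:
--     """Fix common network connectivity issues."""
--     # Ensure there's exactly one gateway
--     lines = vsdl_script.split('\n')
--     fixed_lines = []
--     gateway_count = 0
--     gateway_line_index = -1
--
--     for i, line in enumerate(lines):
--         line_stripped = line.strip()
--         if 'gateway has direct access to the Internet' in line_stripped:
--             gateway_count += 1
--             gateway_line_index = i
--
--     # If multiple gateways, remove extras
--     if gateway_count > 1: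
--         gateway_removed = 0
--         for i, line in enumerate(lines):
--             line_stripped = line.strip()
--             if 'gateway has direct access to the Internet' in line_stripped:
--                 if gateway_removed < gateway_count - 1:
--                     # Comment out extra gateways
--                     indent = len(line) - len(line.lstrip())
--                     spaces = ' ' * indent
--                     fixed_lines.append(f'{spaces}// REMOVED: {line.strip()}')
--                     gateway_removed += 1
--                     continue
--             fixed_lines.append(line)
--     else:
--         fixed_lines = lines
--
--     return '\n'.join(fixed_lines)
-- ===== SOURCE B (Python) =====
-- def fix_network_connectivity_issues(vsdl_script: str) -> str:
--     """Fix common network connectivity issues (single reverse pass)."""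
--     MARK = 'gateway has direct access to the Internet'
--     out = []
--     seen_last_gateway = False
--     for line in reversed(vsdl_script.split('\n')):
--         if MARK in line.strip():
--             if seen_last_gateway:
--                 spaces = ' ' * (len(line) - len(line.lstrip()))
--                 out.append(f'{spaces}// REMOVED: {line.strip()}')
--             else:
--                 seen_last_gateway = True
--                 out.append(line)
--         else:
--             out.append(line)
--     return '\n'.join(reversed(out))
-- ===== Notes on version B (the rewrite author's own statement) =====
-- stated objective: simpler
-- what changed: Replaces A's two forward passes (a counting pass plus a commenting pass gated by gateway_count>1 with a 'removed' counter) by one reverse pass with a single boolean flag that keeps the first gateway seen from the end and comments the rest.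
import Mathlib
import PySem

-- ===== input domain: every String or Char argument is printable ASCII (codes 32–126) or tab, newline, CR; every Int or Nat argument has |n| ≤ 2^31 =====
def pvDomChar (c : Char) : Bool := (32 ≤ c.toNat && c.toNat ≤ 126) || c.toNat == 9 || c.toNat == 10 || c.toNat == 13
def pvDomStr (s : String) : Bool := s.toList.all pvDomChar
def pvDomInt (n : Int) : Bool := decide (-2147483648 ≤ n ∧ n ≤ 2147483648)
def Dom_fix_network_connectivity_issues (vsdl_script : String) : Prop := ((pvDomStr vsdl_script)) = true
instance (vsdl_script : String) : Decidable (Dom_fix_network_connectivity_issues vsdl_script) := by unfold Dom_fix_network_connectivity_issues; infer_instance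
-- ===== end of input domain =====

-- B comments out every duplicate gateway line in ONE reverse pass with a boolean flag,
-- instead of A's two forward passes (count pass + gated commenting pass with a counter). Objective: simpler.

-- shared line-level helpers ('…' in line.strip(); the commented replacement line)
def pvIsGw (line : String) : Bool :=
  PySem.Str.isIn "gateway has direct access to the Internet" (PySem.Str.strip line)

def pvRemoved (line : String) : String :=
  String.ofList (List.replicate (PySem.Str.len line - PySem.Str.len (PySem.Str.lstrip line)).toNat ' ')
    ++ "// REMOVED: " ++ PySem.Str.strip line

-- ===== PORT A =====
def fix_network_connectivity_issues (vsdl_script : String) : String :=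
  let lines := (PySem.Str.split? vsdl_script "\n").getD []
  -- first loop: count gateways (gateway_line_index is tracked by A but never used)
  let counted := (PySem.List.enumerate lines 0).foldl
    (fun (st : Int × Int) (il : Int × String) =>
      if pvIsGw il.2 then (st.1 + 1, il.1) else st) (0, -1)
  let gateway_count := counted.1
  let fixed_lines :=
    if gateway_count > 1 then
      (lines.foldl
        (fun (st : List String × Int) line =>
          if pvIsGw line then
            if st.2 < gateway_count - 1 then (st.1 ++ [pvRemoved line], st.2 + 1)
            else (st.1 ++ [line], st.2)
          else (st.1 ++ [line], st.2)) ([], 0)).1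
    else lines
  PySem.Str.join "\n" fixed_lines

-- ===== PORT B =====
def fix_network_connectivity_issues_alt (vsdl_script : String) : String :=
  let st := ((PySem.Str.split? vsdl_script "\n").getD []).reverse.foldl
    (fun (st : List String × Bool) line =>
      if pvIsGw line then
        if st.2 then (st.1 ++ [pvRemoved line], true)
        else (st.1 ++ [line], true)
      else (st.1 ++ [line], st.2)) ([], false)
  PySem.Str.join "\n" st.1.reverse

-- ===== PRECONDITION & SPEC =====
def Spec_fix_network_connectivity_issues (vsdl_script : String) (out : String) : Prop := out = fix_network_connectivity_issues_alt vsdl_script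
instance (vsdl_script : String) (out : String) : Decidable (Spec_fix_network_connectivity_issues vsdl_script out) := by unfold Spec_fix_network_connectivity_issues; infer_instance

-- ===== CLAIM (what is proved, stated in full; the proofs are below) =====
def Claim_equal_fix_network_connectivity_issues : Prop := ∀ (vsdl_script : String), Dom_fix_network_connectivity_issues vsdl_script → Spec_fix_network_connectivity_issues vsdl_script (fix_network_connectivity_issues vsdl_script)

-- ===== LEMMAS AND PROOFS =====

-- 'comment every match except the last' — the common specification both loops meet
def pvKlast (p : String → Bool) (c : String → String) : List String → List String
  | [] => []
  | l :: ls => if p l = true ∧ ls.countP p ≠ 0 then c l :: pvKlast p c ls else l :: pvKlast p c ls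

-- recursion computing A's second loop
def pvGA (p : String → Bool) (c : String → String) (k : Int) : List String → Int → List String
  | [], _ => []
  | l :: ls, r => if p l = true ∧ r < k then c l :: pvGA p c k ls (r + 1) else l :: pvGA p c k ls r

def pvRA (p : String → Bool) (k : Int) : List String → Int → Int
  | [], r => r
  | l :: ls, r => if p l = true ∧ r < k then pvRA p k ls (r + 1) else pvRA p k ls r

-- recursion computing B's loop (over the reversed lines)
def pvGB (p : String → Bool) (c : String → String) : List String → Bool → List String
  | [], _ => []
  | l :: ls, seen =>
    if p l then (if seen then c l :: pvGB p c ls true else l :: pvGB p c ls true)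
    else l :: pvGB p c ls seen

def pvSB (p : String → Bool) : List String → Bool → Bool
  | [], s => s
  | l :: ls, s => pvSB p ls (s || p l)

theorem pv_foldA (p : String → Bool) (c : String → String) (k : Int) :
    ∀ (lines : List String) (acc : List String) (r : Int),
      lines.foldl
        (fun (st : List String × Int) line =>
          if p line then
            if st.2 < k then (st.1 ++ [c line], st.2 + 1)
            else (st.1 ++ [line], st.2)
          else (st.1 ++ [line], st.2)) (acc, r)
      = (acc ++ pvGA p c k lines r, pvRA p k lines r) := by
  intro lines
  induction lines with
  | nil => intro acc r; simp [pvGA, pvRA]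
  | cons l ls ih =>
    intro acc r
    by_cases hp : p l = true
    · by_cases hr : r < k
      · simp [List.foldl_cons, hp, hr, ih, pvGA, pvRA]
      · simp [List.foldl_cons, hp, hr, ih, pvGA, pvRA]
    · simp [List.foldl_cons, hp, ih, pvGA, pvRA]

theorem pv_foldB (p : String → Bool) (c : String → String) :
    ∀ (ys : List String) (acc : List String) (s : Bool),
      ys.foldl
        (fun (st : List String × Bool) line =>
          if p line then
            if st.2 then (st.1 ++ [c line], true)
            else (st.1 ++ [line], true)
          else (st.1 ++ [line], st.2)) (acc, s)
      = (acc ++ pvGB p c ys s, pvSB p ys s) := by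
  intro ys
  induction ys with
  | nil => intro acc s; simp [pvGB, pvSB]
  | cons l ls ih =>
    intro acc s
    by_cases hp : p l = true
    · cases s <;> simp [List.foldl_cons, hp, ih, pvGB, pvSB]
    · simp [List.foldl_cons, hp, ih, pvGB, pvSB]

theorem pv_foldCount (p : String → Bool) :
    ∀ (xs : List (Int × String)) (c0 i0 : Int),
      (xs.foldl (fun (st : Int × Int) (il : Int × String) =>
          if p il.2 then (st.1 + 1, il.1) else st) (c0, i0)).1
      = c0 + (xs.countP (fun il => p il.2) : Int) := by
  intro xs
  induction xs with
  | nil => intro c0 i0; simp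
  | cons x t ih =>
    intro c0 i0
    by_cases hp : p x.2 = true
    · simp [List.foldl_cons, hp, ih]; ring
    · simp [List.foldl_cons, hp, ih]

theorem pv_countP_enumerate (p : String → Bool) :
    ∀ (xs : List String) (s : Int),
      (PySem.List.enumerate xs s).countP (fun il => p il.2) = xs.countP p := by
  intro xs
  induction xs with
  | nil => intro s; simp [PySem.List.enumerate_nil]
  | cons x t ih => intro s; simp [PySem.List.enumerate_cons, List.countP_cons, ih]

theorem pv_gA_noMatch (p : String → Bool) (c : String → String) (k : Int) :
    ∀ (lines : List String) (r : Int), lines.countP p = 0 → pvGA p c k lines r = lines := by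
  intro lines
  induction lines with
  | nil => intro r _; simp [pvGA]
  | cons l ls ih =>
    intro r h
    rw [List.countP_cons] at h
    by_cases hp : p l = true
    · rw [if_pos hp] at h
      exact absurd h (by omega)
    · rw [if_neg hp] at h
      have ht : ls.countP p = 0 := by omega
      simp [pvGA, hp, ih _ ht]

theorem pv_klast_noMatch (p : String → Bool) (c : String → String) :
    ∀ (lines : List String), lines.countP p = 0 → pvKlast p c lines = lines := by
  intro lines
  induction lines with
  | nil => intro _; simp [pvKlast]
  | cons l ls ih =>
    intro h
    rw [List.countP_cons] at h
    by_cases hp : p l = true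
    · rw [if_pos hp] at h
      exact absurd h (by omega)
    · rw [if_neg hp] at h
      have ht : ls.countP p = 0 := by omega
      simp [pvKlast, hp, ih ht]

theorem pv_gA_eq_klast (p : String → Bool) (c : String → String) (k : Int) :
    ∀ (lines : List String) (r : Int), k + 1 = r + (lines.countP p : Int) →
      pvGA p c k lines r = pvKlast p c lines := by
  intro lines
  induction lines with
  | nil => intro r _; simp [pvGA, pvKlast]
  | cons l ls ih =>
    intro r h
    rw [List.countP_cons] at h
    by_cases hp : p l = true
    · simp [hp] at h
      by_cases hc : ls.countP p = 0
      · have hk : ¬ (r < k) := by omega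
        simp [pvGA, pvKlast, hp, hk, hc,
          pv_gA_noMatch p c k ls r hc, pv_klast_noMatch p c ls hc]
      · have hk : r < k := by omega
        have : k + 1 = (r + 1) + (ls.countP p : Int) := by omega
        simp [pvGA, pvKlast, hp, hk, hc, ih _ this]
    · simp [hp] at h
      simp [pvGA, pvKlast, hp, ih _ h]

theorem pv_gB_true_eq_map (p : String → Bool) (c : String → String) :
    ∀ (ys : List String), pvGB p c ys true = ys.map (fun l => if p l then c l else l) := by
  intro ys
  induction ys with
  | nil => simp [pvGB]
  | cons l ls ih => by_cases hp : p l = true <;> simp [pvGB, hp, ih]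

theorem pv_klast_append_match (p : String → Bool) (c : String → String) (l : String)
    (hl : p l = true) :
    ∀ (xs : List String),
      pvKlast p c (xs ++ [l]) = xs.map (fun x => if p x then c x else x) ++ [l] := by
  intro xs
  induction xs with
  | nil => simp [pvKlast, hl, List.countP_nil]
  | cons x t ih =>
    by_cases hp : p x = true
    · have hne : (t ++ [l]).countP p ≠ 0 := by
        simp [List.countP_append, hl]
      rw [List.cons_append, pvKlast, if_pos ⟨hp, hne⟩, ih]
      simp [hp]
    · rw [List.cons_append, pvKlast, if_neg (by simp [hp]), ih]
      simp [hp]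

theorem pv_klast_append_nonmatch (p : String → Bool) (c : String → String) (l : String)
    (hl : p l = false) :
    ∀ (xs : List String), pvKlast p c (xs ++ [l]) = pvKlast p c xs ++ [l] := by
  intro xs
  induction xs with
  | nil => simp [pvKlast, hl]
  | cons x t ih =>
    have hcnt : (t ++ [l]).countP p = t.countP p := by
      simp [List.countP_append, hl]
    simp only [List.cons_append, pvKlast, hcnt, ih]
    split_ifs <;> simp

theorem pv_gB_reverse (p : String → Bool) (c : String → String) :
    ∀ (ys : List String), (pvGB p c ys false).reverse = pvKlast p c ys.reverse := by
  intro ys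
  induction ys with
  | nil => simp [pvGB, pvKlast]
  | cons l ls ih =>
    by_cases hp : p l = true
    · simp [pvGB, hp, pv_gB_true_eq_map, List.reverse_cons,
        pv_klast_append_match p c l hp, List.map_reverse]
    · have hl : p l = false := by simpa using hp
      simp [pvGB, hp, List.reverse_cons, pv_klast_append_nonmatch p c l hl, ih]

theorem pv_klast_count_le_one (p : String → Bool) (c : String → String) :
    ∀ (lines : List String), lines.countP p ≤ 1 → pvKlast p c lines = lines := by
  intro lines
  induction lines with
  | nil => intro _; simp [pvKlast]
  | cons l ls ih =>
    intro h
    rw [List.countP_cons] at h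
    by_cases hp : p l = true
    · rw [if_pos hp] at h
      have hc : ls.countP p = 0 := by omega
      simp [pvKlast, hp, hc, pv_klast_noMatch p c ls hc]
    · rw [if_neg hp] at h
      simp [pvKlast, hp, ih (by omega)]

-- ===== VERDICT (by name: the statement is the Claim_ definition above) =====
theorem fix_network_connectivity_issues_spec : Claim_equal_fix_network_connectivity_issues := by
  intro vsdl_script _
  unfold Spec_fix_network_connectivity_issues
  unfold fix_network_connectivity_issues fix_network_connectivity_issues_alt
  set lines := (PySem.Str.split? vsdl_script "\n").getD [] with hlines
  simp only [pv_foldA pvIsGw pvRemoved, pv_foldB pvIsGw pvRemoved, List.nil_append]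
  rw [pv_foldCount pvIsGw, pv_countP_enumerate pvIsGw]
  rw [pv_gB_reverse pvIsGw pvRemoved, List.reverse_reverse]
  by_cases hgt : (0 : Int) + (lines.countP pvIsGw : Int) > 1
  · have hk : ((lines.countP pvIsGw : Int) + 0 - 1) + 1 = 0 + (lines.countP pvIsGw : Int) := by omega
    simp only [gt_iff_lt, hgt, if_true]
    rw [pv_gA_eq_klast pvIsGw pvRemoved _ lines 0 (by omega)]
  · have hle : lines.countP pvIsGw ≤ 1 := by omega
    simp only [gt_iff_lt, hgt, if_false]
    rw [pv_klast_count_le_one pvIsGw pvRemoved lines hle]
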